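-- pv_equiv track=rewrite | github.com/thelmn/randompython | Crypto/build/lib/ciphers/RSA.py | get_blocks_from_text
-- ===== SOURCE A (Python) =====
-- DEFAULT_BLOCK_SIZE = 128  # in BYTES. block size should be less than or equal to key size or RSA math fails
--
-- BYTE_SIZE = 256  # BITS. a byte can hold values 0 to 255
--
-- def get_blocks_from_text(message, block_size=DEFAULT_BLOCK_SIZE):
--     # convert message into a list of block integers
--
--     message_bytes = message.encode('ascii')  # returns a bytes object
--     block_ints = []
--     for block_start in range(0, len(message_bytes), block_size):
--         block_int = 0  # int for this block
--         for i in range(block_start, min(block_start + block_size, len(message))):  # min coz last block could be less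
--             # same as 26 = 2*(10^1) + 6*(10^0) with 10 being byte size and 0,1 being place-value(index)
--             # i % block_size converts i into an index from 0 to block_size-1
--             block_int += message_bytes[i] * (BYTE_SIZE ** (i % block_size))
--         block_ints.append(block_int)
--     return block_ints
-- ===== SOURCE B (Python) =====
-- DEFAULT_BLOCK_SIZE = 128
-- BYTE_SIZE = 256
--
-- def get_blocks_from_text(message, block_size=DEFAULT_BLOCK_SIZE):
--     # Consume the byte list chunk by chunk (slice a block off the front), and
--     # build each block integer by Horner's rule over the reversed chunk.
--     remaining = list(message.encode('ascii'))
--     block_ints = []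
--     while remaining and block_size > 0:
--         chunk, remaining = remaining[:block_size], remaining[block_size:]
--         acc = 0
--         for b in reversed(chunk):
--             acc = acc * BYTE_SIZE + b
--         block_ints.append(acc)
--     return block_ints
-- ===== Notes on version B (the rewrite author's own statement) =====
-- stated objective: alternative
-- what changed: B consumes the encoded byte list destructively - a while loop slices one block off the front (remaining[:block_size] / remaining[block_size:]) until the list is empty - and builds each block integer by Horner's rule over the reversed chunk, instead of A's index-arithmetic double loop over ranges with an explicit power BYTE_SIZE**(i % block_size) per byte.
import Mathlib
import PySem

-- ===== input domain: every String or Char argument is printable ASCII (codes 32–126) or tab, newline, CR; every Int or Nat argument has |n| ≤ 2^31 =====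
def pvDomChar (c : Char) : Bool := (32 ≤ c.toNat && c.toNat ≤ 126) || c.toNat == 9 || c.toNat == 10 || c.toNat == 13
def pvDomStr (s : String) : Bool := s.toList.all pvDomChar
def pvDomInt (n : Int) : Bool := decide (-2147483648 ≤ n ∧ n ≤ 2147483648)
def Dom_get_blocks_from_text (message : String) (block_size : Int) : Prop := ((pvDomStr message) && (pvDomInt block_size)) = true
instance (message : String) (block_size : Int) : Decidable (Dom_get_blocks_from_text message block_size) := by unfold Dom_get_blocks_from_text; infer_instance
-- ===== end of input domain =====

-- B consumes the byte list chunk by chunk (a while loop slicing one block off the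
-- front) and builds each block integer by Horner's rule over the reversed chunk,
-- instead of A's index-arithmetic double loop with a power BYTE_SIZE**(i % block_size).

-- ===== PORT A =====
-- message.encode('ascii'): the bytes are the chars' codes (Dom restricts to ASCII).
def get_blocks_from_text (message : String) (block_size : Int) : List Int :=
  let message_bytes : List Int := message.toList.map (fun c => (c.toNat : Int))
  (PySem.List.pyRange 0 (message_bytes.length : Int) block_size).foldl
    (fun block_ints block_start =>
      let block_int : Int :=
        (PySem.List.pyRange block_start
            (min (block_start + block_size) (PySem.Str.len message)) 1).foldl
          (fun acc i =>
            acc + PySem.List.pyGetD message_bytes i 0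
                    * (256 : Int) ^ (PySem.Int.mod i block_size).toNat) 0
      block_ints ++ [block_int]) []

-- ===== PORT B =====
-- acc = acc * BYTE_SIZE + b over reversed(chunk)
def pvBlockInt (chunk : List Int) : Int :=
  chunk.reverse.foldl (fun acc b => acc * 256 + b) 0

-- the while loop: fuel = |remaining| makes the recursion structural; each pass
-- slices remaining[:block_size] off and appends its Horner value
def pvChunks : Nat → Int → List Int → List Int → List Int
  | 0, _, _, block_ints => block_ints
  | fuel + 1, block_size, remaining, block_ints =>
    if remaining ≠ [] ∧ 0 < block_size then
      pvChunks fuel block_size (PySem.List.slice remaining (some block_size) none)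
        (block_ints ++ [pvBlockInt (PySem.List.slice remaining none (some block_size))])
    else block_ints

def get_blocks_from_text_alt (message : String) (block_size : Int) : List Int :=
  let remaining : List Int := message.toList.map (fun c => (c.toNat : Int))
  pvChunks remaining.length block_size remaining []

-- ===== PRECONDITION & SPEC =====
-- Python raises ValueError ('range() arg 3 must not be zero') when block_size = 0.
def Pre_get_blocks_from_text (message : String) (block_size : Int) : Prop := block_size ≠ 0
instance (message : String) (block_size : Int) : Decidable (Pre_get_blocks_from_text message block_size) := by unfold Pre_get_blocks_from_text; infer_instance

def pvWitness_get_blocks_from_text : String × Int := ("ab", 1)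

def Spec_get_blocks_from_text (message : String) (block_size : Int) (out : List Int) : Prop := out = get_blocks_from_text_alt message block_size
instance (message : String) (block_size : Int) (out : List Int) : Decidable (Spec_get_blocks_from_text message block_size out) := by unfold Spec_get_blocks_from_text; infer_instance

-- ===== CLAIM (what is proved, stated in full; the proofs are below) =====
def Claim_equal_get_blocks_from_text : Prop := ∀ (message : String) (block_size : Int), Dom_get_blocks_from_text message block_size → Pre_get_blocks_from_text message block_size → Spec_get_blocks_from_text message block_size (get_blocks_from_text message block_size)


-- ===== LEMMAS AND PROOFS =====

-- range(0, n, bs) with n ≥ 0 and bs < 0 is empty.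
lemma pyRange_zero_neg_eq_nil (n bs : Int) (hn : 0 ≤ n) (hbs : bs < 0) :
    PySem.List.pyRange 0 n bs = [] := by
  unfold PySem.List.pyRange
  have h1 : ¬ bs = 0 := by omega
  have h2 : ¬ 0 < bs := by omega
  have h3 : ¬ n < 0 := by omega
  simp [h1, h2, h3]

-- with a nonpositive block size the while loop body never runs
lemma pvChunks_nonpos (fuel : Nat) (bs : Int) (l acc : List Int) (hbs : bs ≤ 0) :
    pvChunks fuel bs l acc = acc := by
  cases fuel with
  | zero => rfl
  | succ fuel =>
    have h : ¬ (l ≠ [] ∧ 0 < bs) := by rintro ⟨-, h⟩; omega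
    simp [pvChunks, h]

-- Horner back-to-front over a block equals the little-endian power sum.
lemma horner_eq_sum (f : Int → Int) (start : Int) (k : Nat) (acc : Int) :
    (PySem.List.pyRange (start + k - 1) (start - 1) (-1)).foldl
        (fun a i => a * 256 + f i) acc
      = acc * 256 ^ k
        + (PySem.List.pyRange start (start + k) 1).foldl
            (fun a i => a + f i * (256 : Int) ^ (i - start).toNat) 0 := by
  induction k generalizing acc with
  | zero =>
    rw [show start + (0:Nat) - 1 = start - 1 by push_cast; ring,
        PySem.List.pyRange_neg_one_eq_nil (by omega : start - 1 ≤ start - 1),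
        show start + ((0:Nat):Int) = start by push_cast; ring,
        PySem.List.pyRange_one_eq_nil (le_refl start)]
    simp
  | succ k ih =>
    rw [show start + ((k+1 : Nat):Int) - 1 = start + k by push_cast; ring,
        PySem.List.pyRange_neg_one_cons (by omega : start - 1 < start + (k:Int)),
        show start + ((k+1 : Nat):Int) = (start + (k:Int)) + 1 by push_cast; ring,
        PySem.List.pyRange_one_succ_right (by omega : start ≤ start + (k:Int))]
    rw [List.foldl_cons, List.foldl_append]
    rw [ih (acc * 256 + f (start + k))]
    simp only [List.foldl_cons, List.foldl_nil]
    have hk : ((start + (k:Int)) - start).toNat = k := by omega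
    rw [hk]
    ring

-- A's power-sum block equals the descending Horner fold, for any block start
-- divisible by block_size (inside the block, i % block_size = i - start).
lemma block_eq (f : Int → Int) (bs start n : Int) (hbs : 0 < bs) (hdvd : bs ∣ start) :
    (PySem.List.pyRange start (min (start + bs) n) 1).foldl
        (fun a i => a + f i * (256 : Int) ^ (PySem.Int.mod i bs).toNat) 0
      = (PySem.List.pyRange (min (start + bs) n - 1) (start - 1) (-1)).foldl
          (fun a i => a * 256 + f i) 0 := by
  by_cases hle : min (start + bs) n ≤ start
  · rw [PySem.List.pyRange_one_eq_nil hle,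
        PySem.List.pyRange_neg_one_eq_nil (by omega : min (start + bs) n - 1 ≤ start - 1)]
    simp
  · have hlt : start < min (start + bs) n := by omega
    set stop := min (start + bs) n with hstop
    have hkey : ∀ (a : Int), ∀ i ∈ PySem.List.pyRange start stop 1,
        a + f i * (256 : Int) ^ (PySem.Int.mod i bs).toNat
          = a + f i * (256 : Int) ^ (i - start).toNat := by
      intro a i hi
      rw [PySem.List.mem_pyRange_one] at hi
      obtain ⟨q, hq⟩ := hdvd
      have hmod : PySem.Int.mod i bs = i - start := by
        rw [PySem.Int.mod_eq_emod_of_pos hbs]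
        have h1 : i % bs = (i - start) % bs := by
          conv_lhs => rw [show i = (i - start) + bs * q by omega]
          rw [Int.add_mul_emod_self_left]
        rw [h1, Int.emod_eq_of_lt (by omega) (by omega)]
      rw [hmod]
    rw [PySem.List.foldl_congr_mem _ _ _ 0 hkey]
    have hk : stop = start + ((stop - start).toNat : Int) := by omega
    rw [hk, horner_eq_sum f start (stop - start).toNat 0]
    simp

-- range(a, b, bs) with 0 < bs and a < b starts with a
lemma pyRange_pos_cons (a b s : Int) (hs : 0 < s) (hab : a < b) :
    PySem.List.pyRange a b s = a :: PySem.List.pyRange (a + s) b s := by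
  rw [PySem.List.pyRange_of_pos _ _ hs, PySem.List.pyRange_of_pos _ _ hs, if_pos hab]
  have h1 : b - a + s - 1 = (b - a - 1) + 1 * s := by ring
  have h0 : 0 ≤ (b - a - 1) / s := Int.ediv_nonneg (by omega) (by omega)
  rw [h1, Int.add_mul_ediv_right _ _ (by omega : s ≠ 0)]
  have h2 : ((b - a - 1) / s + 1).toNat = ((b - a - 1) / s).toNat + 1 := by omega
  rw [h2, List.range_succ_eq_map, List.map_cons, List.map_map]
  refine List.cons_eq_cons.mpr ⟨by norm_num, ?_⟩
  by_cases hb : a + s < b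
  · rw [if_pos hb, show b - (a + s) + s - 1 = b - a - 1 by ring]
    exact List.map_congr_left (fun k _ => by
      simp only [Function.comp_apply]; push_cast; ring)
  · rw [if_neg hb]
    have h4 : (b - a - 1) / s = 0 :=
      Int.ediv_eq_zero_of_lt (by omega) (by omega)
    simp [h4]

-- range(s, b, s) is range(0, b - s, s) shifted by s
lemma pyRange_pos_shift0 (b s : Int) (hs : 0 < s) :
    PySem.List.pyRange s b s = (PySem.List.pyRange 0 (b - s) s).map (· + s) := by
  rw [PySem.List.pyRange_of_pos _ _ hs, PySem.List.pyRange_of_pos _ _ hs, List.map_map]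
  by_cases h : s < b
  · rw [if_pos h, if_pos (by omega : (0:Int) < b - s),
        show b - s + s - 1 = b - s - 0 + s - 1 by ring]
    exact List.map_congr_left (fun k _ => by simp only [Function.comp_apply]; ring)
  · rw [if_neg h, if_neg (by omega : ¬ (0:Int) < b - s)]
    simp

-- the bytes at indices [start, stop) are a contiguous chunk of the list
lemma map_range_getD_chunk (mb : List Int) (start stop : Int) (h0 : 0 ≤ start)
    (hss : start ≤ stop) (hstop : stop ≤ (mb.length : Int)) :
    (PySem.List.pyRange start stop 1).map (fun j => PySem.List.pyGetD mb j 0)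
      = (mb.drop start.toNat).take (stop - start).toNat := by
  have hsplit := PySem.List.pyRange_one_append start stop (mb.length : Int) hss hstop
  have hfull : (PySem.List.pyRange start (mb.length : Int) 1).map
      (fun j => PySem.List.pyGetD mb j 0) = mb.drop start.toNat :=
    PySem.List.map_pyGetD_pyRange' mb 0 h0
  have hrest : (PySem.List.pyRange stop (mb.length : Int) 1).map
      (fun j => PySem.List.pyGetD mb j 0) = mb.drop stop.toNat :=
    PySem.List.map_pyGetD_pyRange' mb 0 (by omega)
  rw [hsplit, List.map_append, hrest] at hfull
  have hdecomp : mb.drop start.toNat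
      = (mb.drop start.toNat).take (stop - start).toNat
        ++ mb.drop stop.toNat := by
    conv_lhs => rw [← List.take_append_drop (stop - start).toNat (mb.drop start.toNat)]
    rw [List.drop_drop, show start.toNat + (stop - start).toNat = stop.toNat by omega]
  rw [hdecomp] at hfull
  exact List.append_cancel_right hfull

-- A's block value at a block start equals B's Horner value of the head chunk
lemma ablock_eq_blockInt (mb : List Int) (bs start : Int) (hbs : 0 < bs)
    (h0 : 0 ≤ start) (hlt : start < (mb.length : Int)) (hdvd : bs ∣ start) :
    (PySem.List.pyRange start (min (start + bs) (mb.length : Int)) 1).foldl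
        (fun a i => a + PySem.List.pyGetD mb i 0
            * (256 : Int) ^ (PySem.Int.mod i bs).toNat) 0
      = pvBlockInt ((mb.drop start.toNat).take bs.toNat) := by
  rw [block_eq (fun i => PySem.List.pyGetD mb i 0) bs start (mb.length : Int) hbs hdvd]
  set stop := min (start + bs) (mb.length : Int) with hstop
  have h1 : PySem.List.pyRange (stop - 1) (start - 1) (-1)
      = (PySem.List.pyRange start stop 1).reverse := by
    rw [PySem.List.pyRange_neg_one_eq_reverse, show start - 1 + 1 = start by ring,
        show stop - 1 + 1 = stop by ring]
  rw [h1]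
  have h2 : ((PySem.List.pyRange start stop 1).reverse).foldl
        (fun a i => a * 256 + PySem.List.pyGetD mb i 0) 0
      = (((PySem.List.pyRange start stop 1).map
            (fun j => PySem.List.pyGetD mb j 0)).reverse).foldl
          (fun a b => a * 256 + b) 0 := by
    rw [← List.map_reverse, List.foldl_map]
  have hss : start ≤ stop := by
    rw [hstop]; exact le_min (by omega) (le_of_lt hlt)
  have hsl : stop ≤ (mb.length : Int) := by
    rw [hstop]; exact min_le_right _ _
  rw [h2, map_range_getD_chunk mb start stop h0 hss hsl]
  unfold pvBlockInt
  congr 2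
  by_cases hle : start + bs ≤ (mb.length : Int)
  · rw [hstop, min_eq_left hle, show (start + bs - start).toNat = bs.toNat by omega]
  · have hs : stop = (mb.length : Int) := by
      rw [hstop, min_eq_right (by omega : (mb.length : Int) ≤ start + bs)]
    have hlen : (mb.drop start.toNat).length = (stop - start).toNat := by
      rw [hs, List.length_drop]; omega
    rw [← hlen, List.take_length,
        List.take_of_length_le (by omega : (mb.drop start.toNat).length ≤ bs.toNat)]

-- the while loop produces exactly one Horner value per block start
lemma chunks_eq (bs : Int) (hbs : 0 < bs) :
    ∀ (fuel : Nat) (l acc : List Int), l.length ≤ fuel →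
      pvChunks fuel bs l acc
        = acc ++ (PySem.List.pyRange 0 (l.length : Int) bs).map
            (fun s => pvBlockInt ((l.drop s.toNat).take bs.toNat)) := by
  intro fuel
  induction fuel with
  | zero =>
    intro l acc hlen
    have hl : l = [] := by
      cases l with
      | nil => rfl
      | cons x xs => simp at hlen
    subst hl
    simp [pvChunks, PySem.List.pyRange_of_pos _ _ hbs]
  | succ fuel ih =>
    intro l acc hlen
    by_cases hl : l = []
    · subst hl
      simp [pvChunks, PySem.List.pyRange_of_pos _ _ hbs]
    · have hcond : l ≠ [] ∧ 0 < bs := ⟨hl, hbs⟩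
      rw [pvChunks, if_pos hcond,
          PySem.List.slice_from l (le_of_lt hbs), PySem.List.slice_to l (le_of_lt hbs)]
      have hlpos : 0 < l.length := List.length_pos_iff.mpr hl
      have hbn : 1 ≤ bs.toNat := by omega
      rw [ih (l.drop bs.toNat) _ (by simp; omega)]
      rw [pyRange_pos_cons 0 (l.length : Int) bs hbs (by exact_mod_cast hlpos),
          List.map_cons]
      have hhead : pvBlockInt ((l.drop (0:Int).toNat).take bs.toNat)
          = pvBlockInt (l.take bs.toNat) := by norm_num
      rw [hhead, show (0 : Int) + bs = bs by ring, pyRange_pos_shift0 _ bs hbs,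
          List.map_map]
      have htail : (PySem.List.pyRange 0 (((l.drop bs.toNat).length : Int)) bs).map
            (fun s => pvBlockInt (((l.drop bs.toNat).drop s.toNat).take bs.toNat))
          = (PySem.List.pyRange 0 ((l.length : Int) - bs) bs).map
              ((fun s => pvBlockInt ((l.drop s.toNat).take bs.toNat)) ∘ (· + bs)) := by
        by_cases hble : bs.toNat ≤ l.length
        · have hcast : ((l.drop bs.toNat).length : Int) = (l.length : Int) - bs := by
            simp; omega
          rw [hcast]
          apply List.map_congr_left
          intro s hs
          have hmem := (PySem.List.mem_pyRange_iff_of_pos hbs s).mp hs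
          have hs0 : 0 ≤ s := hmem.1
          simp only [Function.comp_apply]
          congr 2
          rw [List.drop_drop]
          congr 1
          omega
        · have h1 : (l.drop bs.toNat).length = 0 := by simp; omega
          have h2 : PySem.List.pyRange 0 (((l.drop bs.toNat).length : Int)) bs = [] := by
            rw [h1]
            simp [PySem.List.pyRange_of_pos _ _ hbs]
          have h3 : PySem.List.pyRange 0 ((l.length : Int) - bs) bs = [] := by
            rw [PySem.List.pyRange_of_pos _ _ hbs,
                if_neg (by omega : ¬ (0 : Int) < (l.length : Int) - bs)]
            simp
          rw [h2, h3]
          simp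
      rw [htail]
      simp

-- ===== VERDICT (by name: the statement is the Claim_ definition above) =====
theorem get_blocks_from_text_spec : Claim_equal_get_blocks_from_text := by
  intro message block_size _ hpre
  unfold Pre_get_blocks_from_text at hpre
  unfold Spec_get_blocks_from_text
  unfold get_blocks_from_text get_blocks_from_text_alt
  dsimp only
  set mb : List Int := message.toList.map (fun c => (c.toNat : Int)) with hmb
  rcases lt_or_gt_of_ne hpre with hneg | hpos
  · rw [pyRange_zero_neg_eq_nil _ _ (by omega : (0:Int) ≤ _) hneg,
        pvChunks_nonpos _ _ _ _ (le_of_lt hneg)]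
    rfl
  · simp only [PySem.List.foldl_append_singleton_eq_map, List.nil_append]
    rw [chunks_eq block_size hpos mb.length mb [] (le_refl _), List.nil_append]
    apply List.map_congr_left
    intro start hs
    have hmem := (PySem.List.mem_pyRange_iff_of_pos hpos start).mp hs
    obtain ⟨h0, hlt, hdvd⟩ := hmem
    have hdvd' : block_size ∣ start := by simpa using hdvd
    have hlen : PySem.Str.len message = (mb.length : Int) := by
      simp [PySem.Str.len, hmb]
    rw [hlen]
    exact ablock_eq_blockInt mb block_size start hpos h0 hlt hdvd'
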